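-- pv_equiv track=rewrite | github.com/mchae90/dsa | codesignal/numberOfLamps.py | numOfLights
-- ===== SOURCE A (Python) =====
-- def numOfLights(lamps, benches):
--     # 1 = start, 2 = bench, 3 = end
--     q = []
--     for start, end in lamps:
--         q.append((start, 1))
--         q.append((end, 3))
--
--     for b in benches:
--         q.append((b, 2))
--
--     q.sort(key = lambda x: (x[0], x[1]))
--
--     res = []
--
--     lights = 0
--     for time, type in q:
--         if type == 1:
--             # on
--             lights += 1
--         elif type == 2:
--             res.append(lights)
--         else:
--             # off
--             lights -= 1
--
--     return res
-- ===== SOURCE B (Python) =====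
-- def numOfLights(lamps, benches):
--     # For each bench (in sorted order) count lamps with start <= b, minus lamps with end < b.
--     res = []
--     for b in sorted(benches):
--         on = 0
--         for s, e in lamps:
--             if s <= b:
--                 on += 1
--             if e < b:
--                 on -= 1
--         res.append(on)
--     return res
-- ===== Notes on version B (the rewrite author's own statement) =====
-- stated objective: simpler
-- what changed: B replaces A's merged three-way event sweep (build start/bench/end events, sort them with a tie-breaking type key, run a counter) by a direct per-bench count: for each bench in sorted order it counts lamps with start <= b minus lamps with end < b.
import Mathlib
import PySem

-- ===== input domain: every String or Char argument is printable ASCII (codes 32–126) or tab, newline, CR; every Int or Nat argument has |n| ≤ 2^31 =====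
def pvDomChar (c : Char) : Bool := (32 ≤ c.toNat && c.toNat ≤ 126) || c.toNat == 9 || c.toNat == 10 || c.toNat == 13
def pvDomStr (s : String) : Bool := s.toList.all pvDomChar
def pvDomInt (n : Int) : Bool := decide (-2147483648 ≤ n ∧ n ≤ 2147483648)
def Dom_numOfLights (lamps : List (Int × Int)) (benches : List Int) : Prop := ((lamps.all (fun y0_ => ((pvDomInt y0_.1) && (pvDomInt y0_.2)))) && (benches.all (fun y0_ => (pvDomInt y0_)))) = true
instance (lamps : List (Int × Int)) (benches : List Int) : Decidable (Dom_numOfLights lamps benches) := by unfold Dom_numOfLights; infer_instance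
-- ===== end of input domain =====

-- B replaces A's merged event sweep (start/bench/end events, sorted with a type tie-break, running counter)
-- by a direct per-bench count over the lamp list, for each bench in sorted order. Objective: simpler.

-- ===== PORT A =====
-- the body of A's final loop (if type == 1 / elif type == 2 / else)
def pvStepA (st : List Int × Int) (e : Int × Int) : List Int × Int :=
  if e.2 = 1 then (st.1, st.2 + 1)
  else if e.2 = 2 then (st.1 ++ [st.2], st.2)
  else (st.1, st.2 - 1)

def numOfLights (lamps : List (Int × Int)) (benches : List Int) : List Int :=
  -- q.append((start, 1)); q.append((end, 3))
  let q := lamps.foldl (fun q p => (q ++ [(p.1, (1 : Int))]) ++ [(p.2, (3 : Int))]) []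
  -- q.append((b, 2))
  let q2 := benches.foldl (fun q b => q ++ [(b, (2 : Int))]) q
  -- q.sort(key = lambda x: (x[0], x[1]))
  let qs := PySem.List.sorted2 q2 Prod.fst Prod.snd
  -- res = []; lights = 0; the sweep loop
  let fin := qs.foldl pvStepA ([], 0)
  fin.1

-- ===== PORT B =====
def numOfLights_alt (lamps : List (Int × Int)) (benches : List Int) : List Int :=
  (PySem.List.sorted benches (fun x => x)).foldl (fun res b =>
    res ++ [lamps.foldl (fun on p =>
      let on1 := if p.1 ≤ b then on + 1 else on
      if p.2 < b then on1 - 1 else on1) (0 : Int)]) []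

-- ===== PRECONDITION & SPEC =====
def Spec_numOfLights (lamps : List (Int × Int)) (benches : List Int) (out : List Int) : Prop := out = numOfLights_alt lamps benches
instance (lamps : List (Int × Int)) (benches : List Int) (out : List Int) : Decidable (Spec_numOfLights lamps benches out) := by unfold Spec_numOfLights; infer_instance

-- ===== CLAIM (what is proved, stated in full; the proofs are below) =====
def Claim_equal_numOfLights : Prop := ∀ (lamps : List (Int × Int)) (benches : List Int), Dom_numOfLights lamps benches → Spec_numOfLights lamps benches (numOfLights lamps benches)

-- ===== LEMMAS AND PROOFS =====

-- lamps with start <= t  /  lamps' events with end < t, as counts over an event list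
def pvCnt1 (l : List (Int × Int)) (t : Int) : Nat := l.countP (fun p => decide (p.2 = 1 ∧ p.1 ≤ t))
def pvCnt3 (l : List (Int × Int)) (t : Int) : Nat := l.countP (fun p => decide (p.2 = 3 ∧ p.1 < t))

-- lamps admitting position t: started at-or-before t, minus ended strictly before t
def pvF (lamps : List (Int × Int)) (t : Int) : Int :=
  (lamps.countP (fun p => decide (p.1 ≤ t)) : Int) - (lamps.countP (fun p => decide (p.2 < t)) : Int)

-- B's inner loop is the two counts
lemma pvInner (lamps : List (Int × Int)) (b : Int) (c : Int) :
    lamps.foldl (fun on p =>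
      if p.2 < b then (if p.1 ≤ b then on + 1 else on) - 1
      else (if p.1 ≤ b then on + 1 else on)) c
    = c + pvF lamps b := by
  induction lamps generalizing c with
  | nil => simp [pvF]
  | cons p t ih =>
      simp only [List.foldl_cons, ih, pvF, List.countP_cons]
      by_cases h1 : p.1 ≤ b <;> by_cases h2 : p.2 < b <;>
        simp [h1, h2] <;> omega

-- A's first loop builds the flatMap of (start,1),(end,3)
lemma pvBuildLamps (lamps : List (Int × Int)) (acc : List (Int × Int)) :
    lamps.foldl (fun q p => (q ++ [(p.1, (1 : Int))]) ++ [(p.2, (3 : Int))]) acc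
    = acc ++ lamps.flatMap (fun p => [(p.1, (1 : Int)), (p.2, (3 : Int))]) := by
  induction lamps generalizing acc with
  | nil => simp
  | cons p t ih => simp [ih, List.flatMap]

-- sorted2 with keys fst, snd is sorted with the lexicographic key
lemma pvSorted2_eq (xs : List (Int × Int)) :
    PySem.List.sorted2 xs Prod.fst Prod.snd
    = PySem.List.sorted xs (fun p => toLex p) := by
  have hfun : (fun (a b : Int × Int) =>
        (decide (a.1 < b.1) || (!decide (b.1 < a.1) && decide (a.2 < b.2))))
      = (fun (a b : Int × Int) => decide (toLex a < toLex b)) := by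
    funext a b
    rw [Bool.eq_iff_iff]
    simp only [Bool.or_eq_true, Bool.and_eq_true, Bool.not_eq_true', decide_eq_true_eq,
      decide_eq_false_iff_not, Prod.Lex.toLex_lt_toLex]
    constructor
    · rintro (h | ⟨h1, h2⟩)
      · exact Or.inl h
      · rcases lt_or_ge a.1 b.1 with h' | h'
        · exact Or.inl h'
        · exact Or.inr ⟨le_antisymm (le_of_not_gt h1) h', h2⟩
    · rintro (h | ⟨h1, h2⟩)
      · exact Or.inl h
      · exact Or.inr ⟨by omega, h2⟩
  rw [PySem.List.sorted_eq_foldl_insertBy]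
  show List.foldl (fun acc x => PySem.List.insertBy (fun a b =>
      (decide (a.1 < b.1) || (!decide (b.1 < a.1) && decide (a.2 < b.2)))) x acc) [] xs = _
  rw [hfun]

-- the sweep over a lex-sorted event list of types 1/2/3 emits, at each bench event,
-- the admission count relative to the whole event list
lemma pvSweep (qs : List (Int × Int)) (res : List Int) (c : Int)
    (hs : qs.Pairwise (fun a b => a.1 < b.1 ∨ (a.1 = b.1 ∧ a.2 ≤ b.2)))
    (ht : ∀ e ∈ qs, e.2 = 1 ∨ e.2 = 2 ∨ e.2 = 3) :
    (qs.foldl pvStepA (res, c)).1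
    = res ++ qs.filterMap (fun e => if e.2 = 2 then
        some (c + (pvCnt1 qs e.1 : Int) - (pvCnt3 qs e.1 : Int)) else none) := by
  induction qs generalizing res c with
  | nil => simp
  | cons x t ih =>
      rw [List.pairwise_cons] at hs
      obtain ⟨hx, hs⟩ := hs
      have htt : ∀ e ∈ t, e.2 = 1 ∨ e.2 = 2 ∨ e.2 = 3 := fun e he => ht e (List.mem_cons_of_mem _ he)
      rcases ht x (List.mem_cons_self) with h1 | h2 | h3
      · -- start event
        rw [List.foldl_cons, show pvStepA (res, c) x = (res, c + 1) by simp [pvStepA, h1],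
          ih res (c + 1) hs htt, List.filterMap_cons_none (by simp [h1])]
        congr 1
        apply List.filterMap_congr
        intro e he
        by_cases h2e : e.2 = 2
        · have hle : x.1 ≤ e.1 := by rcases hx e he with h | ⟨h, _⟩ <;> omega
          have hc1 : pvCnt1 (x :: t) e.1 = pvCnt1 t e.1 + 1 := by
            simp only [pvCnt1, List.countP_cons]
            rw [if_pos (by simp [h1, hle])]
          have hc3 : pvCnt3 (x :: t) e.1 = pvCnt3 t e.1 := by
            simp only [pvCnt3, List.countP_cons]
            rw [if_neg (by simp [h1])]
            omega
          rw [if_pos h2e, if_pos h2e, hc1, hc3, Option.some.injEq]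
          push_cast
          omega
        · rw [if_neg h2e, if_neg h2e]
      · -- bench event
        have hc1 : pvCnt1 (x :: t) x.1 = 0 := by
          simp only [pvCnt1, List.countP_eq_zero]
          intro p hp
          rcases List.mem_cons.mp hp with rfl | hp
          · simp [h2]
          · rcases hx p hp with h | ⟨h, h'⟩
            · simp; omega
            · simp only [decide_eq_true_eq]; rintro ⟨hp1, _⟩; rw [hp1] at h'; omega
        have hc3 : pvCnt3 (x :: t) x.1 = 0 := by
          simp only [pvCnt3, List.countP_eq_zero]
          intro p hp
          rcases List.mem_cons.mp hp with rfl | hp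
          · simp [h2]
          · rcases hx p hp with h | ⟨h, _⟩ <;> (simp only [decide_eq_true_eq]; rintro ⟨_, h''⟩; omega)
        rw [List.foldl_cons, show pvStepA (res, c) x = (res ++ [c], c) by simp [pvStepA, h2],
          ih (res ++ [c]) c hs htt,
          List.filterMap_cons_some (b := c) (by rw [if_pos h2, hc1, hc3]; norm_num)]
        have hfm : t.filterMap (fun e => if e.2 = 2 then
              some (c + (pvCnt1 t e.1 : Int) - (pvCnt3 t e.1 : Int)) else none)
            = t.filterMap (fun e => if e.2 = 2 then
              some (c + (pvCnt1 (x :: t) e.1 : Int) - (pvCnt3 (x :: t) e.1 : Int)) else none) := by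
          apply List.filterMap_congr
          intro e he
          by_cases h2e : e.2 = 2
          · have hc1 : pvCnt1 (x :: t) e.1 = pvCnt1 t e.1 := by
              simp only [pvCnt1, List.countP_cons]
              rw [if_neg (by simp [h2])]
              omega
            have hc3 : pvCnt3 (x :: t) e.1 = pvCnt3 t e.1 := by
              simp only [pvCnt3, List.countP_cons]
              rw [if_neg (by simp [h2])]
              omega
            rw [if_pos h2e, if_pos h2e, hc1, hc3]
          · rw [if_neg h2e, if_neg h2e]
        rw [← hfm]
        simp
      · -- end event
        rw [List.foldl_cons, show pvStepA (res, c) x = (res, c - 1) by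
            simp only [pvStepA, h3]; norm_num,
          ih res (c - 1) hs htt, List.filterMap_cons_none (by simp [h3])]
        congr 1
        apply List.filterMap_congr
        intro e he
        by_cases h2e : e.2 = 2
        · have hlt : x.1 < e.1 := by
            rcases hx e he with h | ⟨h, h'⟩
            · exact h
            · rw [h3] at h'; rw [h2e] at h'; omega
          have hc1 : pvCnt1 (x :: t) e.1 = pvCnt1 t e.1 := by
            simp only [pvCnt1, List.countP_cons]
            rw [if_neg (by simp [h3])]
            omega
          have hc3 : pvCnt3 (x :: t) e.1 = pvCnt3 t e.1 + 1 := by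
            simp only [pvCnt3, List.countP_cons]
            rw [if_pos (by simp [h3, hlt])]
          rw [if_pos h2e, if_pos h2e, hc1, hc3, Option.some.injEq]
          push_cast
          omega
        · rw [if_neg h2e, if_neg h2e]

-- filterMap of an 'if type = 2' function is a map over the type-2 filter
lemma pvFilterMap_eq (l : List (Int × Int)) (F : Int → Int) :
    l.filterMap (fun e => if e.2 = 2 then some (F e.1) else none)
    = (l.filter (fun e => decide (e.2 = 2))).map (fun e => F e.1) := by
  induction l with
  | nil => simp
  | cons x t ih =>
      by_cases h : x.2 = 2
      · simp [h, ih]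
      · simp [h, ih]

-- the two event-list counts reduce to counts over the lamps
lemma pvCnt1_events (lamps : List (Int × Int)) (benches : List Int) (t : Int) :
    pvCnt1 (lamps.flatMap (fun p => [(p.1, (1 : Int)), (p.2, (3 : Int))])
            ++ benches.map (fun b => (b, (2 : Int)))) t
    = lamps.countP (fun p => decide (p.1 ≤ t)) := by
  simp only [pvCnt1, List.countP_append]
  have hm : (benches.map (fun b => (b, (2 : Int)))).countP
      (fun p => decide (p.2 = 1 ∧ p.1 ≤ t)) = 0 := by
    rw [List.countP_eq_zero]
    intro p hp
    obtain ⟨b, _, rfl⟩ := List.mem_map.mp hp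
    simp
  rw [hm, Nat.add_zero]
  induction lamps with
  | nil => simp
  | cons p l ih =>
      simp only [List.flatMap_cons, List.countP_append, List.countP_cons, List.countP_nil,
        List.countP_cons, ih]
      by_cases h : p.1 ≤ t <;> simp [h] <;> omega

lemma pvCnt3_events (lamps : List (Int × Int)) (benches : List Int) (t : Int) :
    pvCnt3 (lamps.flatMap (fun p => [(p.1, (1 : Int)), (p.2, (3 : Int))])
            ++ benches.map (fun b => (b, (2 : Int)))) t
    = lamps.countP (fun p => decide (p.2 < t)) := by
  simp only [pvCnt3, List.countP_append]
  have hm : (benches.map (fun b => (b, (2 : Int)))).countP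
      (fun p => decide (p.2 = 3 ∧ p.1 < t)) = 0 := by
    rw [List.countP_eq_zero]
    intro p hp
    obtain ⟨b, _, rfl⟩ := List.mem_map.mp hp
    simp
  rw [hm, Nat.add_zero]
  induction lamps with
  | nil => simp
  | cons p l ih =>
      simp only [List.flatMap_cons, List.countP_append, List.countP_cons, List.countP_nil, ih]
      by_cases h : p.2 < t <;> simp [h] <;> omega

-- ===== VERDICT (by name: the statement is the Claim_ definition above) =====
theorem numOfLights_spec : Claim_equal_numOfLights := by
  intro lamps benches _
  simp only [Spec_numOfLights, numOfLights, numOfLights_alt]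
  rw [pvBuildLamps, List.nil_append, PySem.List.foldl_append_singleton_eq_map, pvSorted2_eq]
  have hperm : (PySem.List.sorted (lamps.flatMap (fun p => [(p.1, (1 : Int)), (p.2, (3 : Int))])
        ++ benches.map (fun b => (b, (2 : Int)))) (fun p => toLex p)).Perm
      (lamps.flatMap (fun p => [(p.1, (1 : Int)), (p.2, (3 : Int))])
        ++ benches.map (fun b => (b, (2 : Int)))) := PySem.List.sorted_perm _ _ _
  have hpair : (PySem.List.sorted (lamps.flatMap (fun p => [(p.1, (1 : Int)), (p.2, (3 : Int))])
        ++ benches.map (fun b => (b, (2 : Int)))) (fun p => toLex p)).Pairwise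
      (fun a b => a.1 < b.1 ∨ (a.1 = b.1 ∧ a.2 ≤ b.2)) := by
    refine (PySem.List.sorted_pairwise _ _).imp ?_
    intro a b h
    rw [Prod.Lex.toLex_le_toLex] at h
    exact h
  have ht : ∀ e ∈ PySem.List.sorted (lamps.flatMap (fun p => [(p.1, (1 : Int)), (p.2, (3 : Int))])
        ++ benches.map (fun b => (b, (2 : Int)))) (fun p => toLex p),
      e.2 = 1 ∨ e.2 = 2 ∨ e.2 = 3 := by
    intro e he
    rcases List.mem_append.mp (hperm.mem_iff.mp he) with h | h
    · obtain ⟨p, _, hp⟩ := List.mem_flatMap.mp h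
      rcases List.mem_cons.mp hp with rfl | hp'
      · left; rfl
      · rcases List.mem_cons.mp hp' with rfl | h'
        · right; right; rfl
        · cases h'
    · obtain ⟨b, _, rfl⟩ := List.mem_map.mp h
      right; left; rfl
  rw [pvSweep _ [] 0 hpair ht, List.nil_append]
  have hcongr : (PySem.List.sorted (lamps.flatMap (fun p => [(p.1, (1 : Int)), (p.2, (3 : Int))])
        ++ benches.map (fun b => (b, (2 : Int)))) (fun p => toLex p)).filterMap
        (fun e => if e.2 = 2 then
          some (0 + (pvCnt1 (PySem.List.sorted (lamps.flatMap (fun p => [(p.1, (1 : Int)), (p.2, (3 : Int))])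
            ++ benches.map (fun b => (b, (2 : Int)))) (fun p => toLex p)) e.1 : Int)
            - (pvCnt3 (PySem.List.sorted (lamps.flatMap (fun p => [(p.1, (1 : Int)), (p.2, (3 : Int))])
            ++ benches.map (fun b => (b, (2 : Int)))) (fun p => toLex p)) e.1 : Int)) else none)
      = (PySem.List.sorted (lamps.flatMap (fun p => [(p.1, (1 : Int)), (p.2, (3 : Int))])
        ++ benches.map (fun b => (b, (2 : Int)))) (fun p => toLex p)).filterMap
        (fun e => if e.2 = 2 then some (pvF lamps e.1) else none) := by
    apply List.filterMap_congr
    intro e _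
    by_cases h2e : e.2 = 2
    · rw [if_pos h2e, if_pos h2e, Option.some.injEq,
        show ∀ t, pvCnt1 (PySem.List.sorted (lamps.flatMap (fun p => [(p.1, (1 : Int)), (p.2, (3 : Int))])
          ++ benches.map (fun b => (b, (2 : Int)))) (fun p => toLex p)) t
          = pvCnt1 (lamps.flatMap (fun p => [(p.1, (1 : Int)), (p.2, (3 : Int))])
          ++ benches.map (fun b => (b, (2 : Int)))) t from fun t => hperm.countP_eq _,
        show ∀ t, pvCnt3 (PySem.List.sorted (lamps.flatMap (fun p => [(p.1, (1 : Int)), (p.2, (3 : Int))])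
          ++ benches.map (fun b => (b, (2 : Int)))) (fun p => toLex p)) t
          = pvCnt3 (lamps.flatMap (fun p => [(p.1, (1 : Int)), (p.2, (3 : Int))])
          ++ benches.map (fun b => (b, (2 : Int)))) t from fun t => hperm.countP_eq _,
        pvCnt1_events, pvCnt3_events, pvF]
      omega
    · rw [if_neg h2e, if_neg h2e]
  rw [hcongr, pvFilterMap_eq _ (pvF lamps)]
  -- the type-2 entries of the sorted event list, projected to positions, are sorted(benches)
  have hfiltM : (lamps.flatMap (fun p => [(p.1, (1 : Int)), (p.2, (3 : Int))])
        ++ benches.map (fun b => (b, (2 : Int)))).filter (fun e => decide (e.2 = 2))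
      = benches.map (fun b => (b, (2 : Int))) := by
    rw [List.filter_append]
    have h1 : (lamps.flatMap (fun p => [(p.1, (1 : Int)), (p.2, (3 : Int))])).filter
        (fun e => decide (e.2 = 2)) = [] := by
      rw [List.filter_eq_nil_iff]
      intro e he
      obtain ⟨p, _, hp⟩ := List.mem_flatMap.mp he
      rcases List.mem_cons.mp hp with rfl | hp'
      · simp
      · rcases List.mem_cons.mp hp' with rfl | h'
        · simp
        · cases h'
    have h2 : (benches.map (fun b => (b, (2 : Int)))).filter (fun e => decide (e.2 = 2))
        = benches.map (fun b => (b, (2 : Int))) := by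
      rw [List.filter_eq_self]
      intro e he
      obtain ⟨b, _, rfl⟩ := List.mem_map.mp he
      simp
    rw [h1, h2, List.nil_append]
  have hpermf : (((PySem.List.sorted (lamps.flatMap (fun p => [(p.1, (1 : Int)), (p.2, (3 : Int))])
        ++ benches.map (fun b => (b, (2 : Int)))) (fun p => toLex p)).filter
        (fun e => decide (e.2 = 2))).map Prod.fst).Perm benches := by
    have h := (hperm.filter (fun e => decide (e.2 = 2)))
    rw [hfiltM] at h
    have h2 := h.map Prod.fst
    rw [List.map_map] at h2
    simpa [Function.comp_def] using h2
  have hpairf : (((PySem.List.sorted (lamps.flatMap (fun p => [(p.1, (1 : Int)), (p.2, (3 : Int))])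
        ++ benches.map (fun b => (b, (2 : Int)))) (fun p => toLex p)).filter
        (fun e => decide (e.2 = 2))).map Prod.fst).Pairwise (· ≤ ·) := by
    refine List.Pairwise.map _ ?_ (hpair.sublist List.filter_sublist)
    intro a b h
    rcases h with h | ⟨h, _⟩ <;> omega
  have hsortedb : PySem.List.sorted benches (fun x => x)
      = ((PySem.List.sorted (lamps.flatMap (fun p => [(p.1, (1 : Int)), (p.2, (3 : Int))])
        ++ benches.map (fun b => (b, (2 : Int)))) (fun p => toLex p)).filter
        (fun e => decide (e.2 = 2))).map Prod.fst :=
    PySem.List.sorted_id_eq_of_perm_of_pairwise benches _ hpermf hpairf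
  rw [PySem.List.foldl_append_singleton_eq_map, hsortedb, List.map_map]
  apply List.map_congr_left
  intro e _
  rw [Function.comp_apply, pvInner]
  simp
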